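-- pv_equiv track=rewrite | github.com/ICST-AI-Delivery/Full-pipeline-testcase-generator- | scripts/archive/create_additional_evaluation_set.py | categorize_by_domain
-- ===== SOURCE A (Python) =====
-- def categorize_by_domain(image_paths):
--     """Categorize images by their domain/function area."""
--     domains = {
--         'Audio_Tuner': [],
--         'Navigation': [],
--         'Parking_Systems': [],
--         'HMI_Software': [],
--         'System_Architecture': [],
--         'Driver_Assistance': [],
--         'Vehicle_Status': [],
--         'Safety_Systems': [],
--         'Instrument_Cluster': [],
--         'Connectivity': [],
--         'Diagnostics': [],
--         'Other': []
--     }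
--
--     for path in image_paths:
--         path_lower = path.lower()
--
--         if any(x in path_lower for x in ['rad-', 'tuner', 'audio']):
--             domains['Audio_Tuner'].append(path)
--         elif any(x in path_lower for x in ['map-', 'navigation', 'navigator']):
--             domains['Navigation'].append(path)
--         elif any(x in path_lower for x in ['prk-', 'parking', 'camera', 'proximity']):
--             domains['Parking_Systems'].append(path)
--         elif any(x in path_lower for x in ['vfi-', 'set-', 'hmi', 'profile']):
--             domains['HMI_Software'].append(path)
--         elif any(x in path_lower for x in ['f244', 'f834', 'pmn-', 'system architecture', 'power', 'ethernet']):
--             domains['System_Architecture'].append(path)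
--         elif any(x in path_lower for x in ['f53', 'f56', 'cruise', 'lane', 'collision', 'adaptive']):
--             domains['Driver_Assistance'].append(path)
--         elif any(x in path_lower for x in ['f80', 'f81', 'battery', 'charging', 'hybrid', 'performance']):
--             domains['Vehicle_Status'].append(path)
--         elif any(x in path_lower for x in ['f139', 'f140', 'airbag', 'seatbelt', 'brake']):
--             domains['Safety_Systems'].append(path)
--         elif any(x in path_lower for x in ['instrument cluster', 'speedometer', 'odometer', 'telltale']):
--             domains['Instrument_Cluster'].append(path)
--         elif any(x in path_lower for x in ['connectivity', 'usb', 'wireless']):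
--             domains['Connectivity'].append(path)
--         elif any(x in path_lower for x in ['diagnostic', 'test']):
--             domains['Diagnostics'].append(path)
--         else:
--             domains['Other'].append(path)
--
--     return domains
-- ===== SOURCE B (Python) =====
-- DOMAIN_KEYWORDS = [
--     ('Audio_Tuner', ['rad-', 'tuner', 'audio']),
--     ('Navigation', ['map-', 'navigation', 'navigator']),
--     ('Parking_Systems', ['prk-', 'parking', 'camera', 'proximity']),
--     ('HMI_Software', ['vfi-', 'set-', 'hmi', 'profile']),
--     ('System_Architecture', ['f244', 'f834', 'pmn-', 'system architecture', 'power', 'ethernet']),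
--     ('Driver_Assistance', ['f53', 'f56', 'cruise', 'lane', 'collision', 'adaptive']),
--     ('Vehicle_Status', ['f80', 'f81', 'battery', 'charging', 'hybrid', 'performance']),
--     ('Safety_Systems', ['f139', 'f140', 'airbag', 'seatbelt', 'brake']),
--     ('Instrument_Cluster', ['instrument cluster', 'speedometer', 'odometer', 'telltale']),
--     ('Connectivity', ['connectivity', 'usb', 'wireless']),
--     ('Diagnostics', ['diagnostic', 'test']),
-- ]
--
--
-- def _classify(path):
--     """First domain (in priority order) with a keyword occurring in path.lower(), else 'Other'."""
--     path_lower = path.lower()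
--     for name, keywords in DOMAIN_KEYWORDS:
--         if any(k in path_lower for k in keywords):
--             return name
--     return 'Other'
--
--
-- def categorize_by_domain(image_paths):
--     """Categorize images by their domain/function area (table-driven)."""
--     names = [name for name, _ in DOMAIN_KEYWORDS] + ['Other']
--     labeled = [(_classify(p), p) for p in image_paths]
--     return {name: [p for label, p in labeled if label == name] for name in names}
-- ===== Notes on version B (the rewrite author's own statement) =====
-- stated objective: simpler
-- what changed: Replaces the twelve-branch if-elif chain that dispatches each path into a pre-built dict with a priority-ordered (domain, keywords) table, a classifier returning the first matching domain, and a dict comprehension building each domain's list by filtering the paths.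
import Mathlib
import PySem

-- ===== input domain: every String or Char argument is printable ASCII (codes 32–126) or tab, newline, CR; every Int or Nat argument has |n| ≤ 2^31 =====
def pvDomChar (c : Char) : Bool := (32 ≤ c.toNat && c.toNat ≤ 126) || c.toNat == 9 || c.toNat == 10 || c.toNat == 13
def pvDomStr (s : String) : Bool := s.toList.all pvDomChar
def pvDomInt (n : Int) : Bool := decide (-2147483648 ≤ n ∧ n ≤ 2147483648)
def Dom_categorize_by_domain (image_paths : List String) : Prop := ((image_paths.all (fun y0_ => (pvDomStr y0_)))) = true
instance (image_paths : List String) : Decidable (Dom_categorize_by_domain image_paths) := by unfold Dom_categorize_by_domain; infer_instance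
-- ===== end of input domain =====

-- B replaces A's twelve-branch if-elif chain by a priority-ordered (domain, keywords) table,
-- a first-match classifier, and a per-domain filter comprehension; same cost, simpler structure.


-- ===== PORT A =====
-- literal transliteration: dict literal with the 12 keys, then the if-elif chain appending via modify
def categorize_by_domain (image_paths : List String) : List (String × List String) :=
  let domains : PySem.Dict String (List String) := PySem.Dict.mk
    [("Audio_Tuner", []), ("Navigation", []), ("Parking_Systems", []), ("HMI_Software", []),
     ("System_Architecture", []), ("Driver_Assistance", []), ("Vehicle_Status", []),
     ("Safety_Systems", []), ("Instrument_Cluster", []), ("Connectivity", []),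
     ("Diagnostics", []), ("Other", [])]
  (image_paths.foldl (fun d path =>
    let pl := PySem.Str.lower path
    if ["rad-", "tuner", "audio"].any (fun x => PySem.Str.isIn x pl) then
      d.modify "Audio_Tuner" [] (· ++ [path])
    else if ["map-", "navigation", "navigator"].any (fun x => PySem.Str.isIn x pl) then
      d.modify "Navigation" [] (· ++ [path])
    else if ["prk-", "parking", "camera", "proximity"].any (fun x => PySem.Str.isIn x pl) then
      d.modify "Parking_Systems" [] (· ++ [path])
    else if ["vfi-", "set-", "hmi", "profile"].any (fun x => PySem.Str.isIn x pl) then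
      d.modify "HMI_Software" [] (· ++ [path])
    else if ["f244", "f834", "pmn-", "system architecture", "power", "ethernet"].any (fun x => PySem.Str.isIn x pl) then
      d.modify "System_Architecture" [] (· ++ [path])
    else if ["f53", "f56", "cruise", "lane", "collision", "adaptive"].any (fun x => PySem.Str.isIn x pl) then
      d.modify "Driver_Assistance" [] (· ++ [path])
    else if ["f80", "f81", "battery", "charging", "hybrid", "performance"].any (fun x => PySem.Str.isIn x pl) then
      d.modify "Vehicle_Status" [] (· ++ [path])
    else if ["f139", "f140", "airbag", "seatbelt", "brake"].any (fun x => PySem.Str.isIn x pl) then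
      d.modify "Safety_Systems" [] (· ++ [path])
    else if ["instrument cluster", "speedometer", "odometer", "telltale"].any (fun x => PySem.Str.isIn x pl) then
      d.modify "Instrument_Cluster" [] (· ++ [path])
    else if ["connectivity", "usb", "wireless"].any (fun x => PySem.Str.isIn x pl) then
      d.modify "Connectivity" [] (· ++ [path])
    else if ["diagnostic", "test"].any (fun x => PySem.Str.isIn x pl) then
      d.modify "Diagnostics" [] (· ++ [path])
    else
      d.modify "Other" [] (· ++ [path])) domains).items

-- ===== PORT B =====
def pvTable : List (String × List String) :=
  [("Audio_Tuner", ["rad-", "tuner", "audio"]),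
   ("Navigation", ["map-", "navigation", "navigator"]),
   ("Parking_Systems", ["prk-", "parking", "camera", "proximity"]),
   ("HMI_Software", ["vfi-", "set-", "hmi", "profile"]),
   ("System_Architecture", ["f244", "f834", "pmn-", "system architecture", "power", "ethernet"]),
   ("Driver_Assistance", ["f53", "f56", "cruise", "lane", "collision", "adaptive"]),
   ("Vehicle_Status", ["f80", "f81", "battery", "charging", "hybrid", "performance"]),
   ("Safety_Systems", ["f139", "f140", "airbag", "seatbelt", "brake"]),
   ("Instrument_Cluster", ["instrument cluster", "speedometer", "odometer", "telltale"]),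
   ("Connectivity", ["connectivity", "usb", "wireless"]),
   ("Diagnostics", ["diagnostic", "test"])]

-- the for-loop of _classify: first table entry with a matching keyword, else 'Other'
def pvClassifyAux : List (String × List String) → String → String
  | [], _ => "Other"
  | (name, kws) :: rest, pl =>
      if kws.any (fun k => PySem.Str.isIn k pl) then name else pvClassifyAux rest pl

def pvClassify (path : String) : String := pvClassifyAux pvTable (PySem.Str.lower path)

def categorize_by_domain_alt (image_paths : List String) : List (String × List String) :=
  let names := pvTable.map (·.1) ++ ["Other"]
  let labeled := image_paths.map (fun p => (pvClassify p, p))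
  names.map (fun name => (name, (labeled.filter (fun e => e.1 == name)).map (·.2)))

-- ===== PRECONDITION & SPEC =====
def Spec_categorize_by_domain (image_paths : List String) (out : List (String × List String)) : Prop := out = categorize_by_domain_alt image_paths
instance (image_paths : List String) (out : List (String × List String)) : Decidable (Spec_categorize_by_domain image_paths out) := by unfold Spec_categorize_by_domain; infer_instance

-- ===== CLAIM (what is proved, stated in full; the proofs are below) =====
def Claim_equal_categorize_by_domain : Prop := ∀ (image_paths : List String), Dom_categorize_by_domain image_paths → Spec_categorize_by_domain image_paths (categorize_by_domain image_paths)

-- ===== LEMMAS AND PROOFS =====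

-- the names list of B (12 keys in insertion order)
def pvNames : List String := pvTable.map (·.1) ++ ["Other"]

-- A's loop body, named for the lemmas
def pvStepA (d : PySem.Dict String (List String)) (path : String) : PySem.Dict String (List String) :=
  let pl := PySem.Str.lower path
  if ["rad-", "tuner", "audio"].any (fun x => PySem.Str.isIn x pl) then
    d.modify "Audio_Tuner" [] (· ++ [path])
  else if ["map-", "navigation", "navigator"].any (fun x => PySem.Str.isIn x pl) then
    d.modify "Navigation" [] (· ++ [path])
  else if ["prk-", "parking", "camera", "proximity"].any (fun x => PySem.Str.isIn x pl) then
    d.modify "Parking_Systems" [] (· ++ [path])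
  else if ["vfi-", "set-", "hmi", "profile"].any (fun x => PySem.Str.isIn x pl) then
    d.modify "HMI_Software" [] (· ++ [path])
  else if ["f244", "f834", "pmn-", "system architecture", "power", "ethernet"].any (fun x => PySem.Str.isIn x pl) then
    d.modify "System_Architecture" [] (· ++ [path])
  else if ["f53", "f56", "cruise", "lane", "collision", "adaptive"].any (fun x => PySem.Str.isIn x pl) then
    d.modify "Driver_Assistance" [] (· ++ [path])
  else if ["f80", "f81", "battery", "charging", "hybrid", "performance"].any (fun x => PySem.Str.isIn x pl) then
    d.modify "Vehicle_Status" [] (· ++ [path])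
  else if ["f139", "f140", "airbag", "seatbelt", "brake"].any (fun x => PySem.Str.isIn x pl) then
    d.modify "Safety_Systems" [] (· ++ [path])
  else if ["instrument cluster", "speedometer", "odometer", "telltale"].any (fun x => PySem.Str.isIn x pl) then
    d.modify "Instrument_Cluster" [] (· ++ [path])
  else if ["connectivity", "usb", "wireless"].any (fun x => PySem.Str.isIn x pl) then
    d.modify "Connectivity" [] (· ++ [path])
  else if ["diagnostic", "test"].any (fun x => PySem.Str.isIn x pl) then
    d.modify "Diagnostics" [] (· ++ [path])
  else
    d.modify "Other" [] (· ++ [path])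

-- A's if-elif chain appends to exactly the key pvClassify picks
set_option maxHeartbeats 1000000 in
theorem pvStepA_eq_modify (d : PySem.Dict String (List String)) (path : String) :
    pvStepA d path = d.modify (pvClassify path) [] (· ++ [path]) := by
  unfold pvStepA pvClassify pvTable
  unfold pvClassifyAux
  unfold pvClassifyAux
  unfold pvClassifyAux
  unfold pvClassifyAux
  unfold pvClassifyAux
  unfold pvClassifyAux
  unfold pvClassifyAux
  unfold pvClassifyAux
  unfold pvClassifyAux
  unfold pvClassifyAux
  unfold pvClassifyAux
  simp only [apply_ite (fun k => PySem.Dict.modify d k [] (· ++ [path]))]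
  rfl

theorem pvClassify_mem_names (path : String) : pvClassify path ∈ pvNames := by
  unfold pvClassify pvNames
  generalize PySem.Str.lower path = pl
  induction pvTable with
  | nil => simp [pvClassifyAux]
  | cons e rest ih =>
      obtain ⟨name, kws⟩ := e
      simp only [pvClassifyAux]
      by_cases h : (kws.any fun k => PySem.Str.isIn k pl) = true
      · rw [if_pos h]; simp
      · rw [if_neg h]
        simp only [List.map_cons, List.cons_append, List.mem_cons]
        right; exact ih

theorem pvGetD_map (ns : List String) (acc : String → List String) (k : String) (h : k ∈ ns) :
    PySem.Dict.getD (PySem.Dict.mk (ns.map (fun n => (n, acc n)))) k [] = acc k := by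
  induction ns with
  | nil => simp at h
  | cons n ns ih =>
      rcases List.mem_cons.mp h with rfl | hm
      · simp [PySem.Dict.getD, PySem.Dict.get?]
      · by_cases hk : n = k
        · subst hk; simp [PySem.Dict.getD, PySem.Dict.get?]
        · simpa [PySem.Dict.getD, PySem.Dict.get?, hk] using ih hm

theorem pvContains_map (ns : List String) (acc : String → List String) (k : String) (h : k ∈ ns) :
    PySem.Dict.contains (PySem.Dict.mk (ns.map (fun n => (n, acc n)))) k = true := by
  induction ns with
  | nil => simp at h
  | cons n ns ih =>
      rcases List.mem_cons.mp h with rfl | hm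
      · simp [PySem.Dict.contains]
      · by_cases hk : n = k
        · subst hk; simp [PySem.Dict.contains]
        · simpa [PySem.Dict.contains, PySem.Dict.get?, hk] using ih hm

theorem pvModify_map (ns : List String) (acc : String → List String) (k : String) (p : String)
    (h : k ∈ ns) :
    PySem.Dict.modify (PySem.Dict.mk (ns.map (fun n => (n, acc n)))) k [] (· ++ [p])
      = PySem.Dict.mk (ns.map (fun n => (n, if n == k then acc n ++ [p] else acc n))) := by
  unfold PySem.Dict.modify PySem.Dict.insert
  rw [pvGetD_map ns acc k h]
  rw [if_pos (pvContains_map ns acc k h)]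
  congr 1
  rw [List.map_map]
  apply List.map_congr_left
  intro n _
  by_cases hn : n = k
  · subst hn; simp
  · simp [hn]

theorem pvLoop (ps : List String) (acc : String → List String) :
    (ps.foldl pvStepA (PySem.Dict.mk (pvNames.map (fun n => (n, acc n))))).items
      = pvNames.map (fun n => (n, acc n ++ ps.filter (fun p => pvClassify p == n))) := by
  induction ps generalizing acc with
  | nil => simp
  | cons p ps ih =>
      rw [List.foldl_cons, pvStepA_eq_modify,
        pvModify_map pvNames acc (pvClassify p) p (pvClassify_mem_names p), ih]
      apply List.map_congr_left
      intro n _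
      by_cases hn : n = pvClassify p
      · subst hn; simp
      · simp [hn, Ne.symm hn]

-- B's filter-over-labeled-pairs is the plain filter by classifier
theorem pvLabeled_filter (l : List String) (n : String) :
    ((l.map (fun p => (pvClassify p, p))).filter (fun e => e.1 == n)).map (·.2)
      = l.filter (fun p => pvClassify p == n) := by
  induction l with
  | nil => rfl
  | cons p l ih =>
      by_cases hp : pvClassify p == n
      · simp [hp, ih]
      · simp only [List.map_cons, List.filter_cons, hp]
        simpa [hp] using ih

-- ===== VERDICT (by name: the statement is the Claim_ definition above) =====
theorem categorize_by_domain_spec : Claim_equal_categorize_by_domain := by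
  intro image_paths _
  show categorize_by_domain image_paths = categorize_by_domain_alt image_paths
  have h := pvLoop image_paths (fun _ => [])
  simp only [List.nil_append] at h
  show _ = pvNames.map (fun name => (name,
    ((image_paths.map (fun p => (pvClassify p, p))).filter (fun e => e.1 == name)).map (·.2)))
  simp only [pvLabeled_filter]
  exact h
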